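-- pv_equiv track=rewrite | github.com/nobe0716/problem_solving | codeforces/contests/1437/D. Minimal Height Tree.py | solve
-- ===== SOURCE A (Python) =====
-- def solve(n, a):
--     if n == 1:
--         return 0
--     height = 1
--     parent_count = 1
--     node_count = 1
--     last_node = a[1]
--     for e in a[2:]:
--         if e < last_node:
--             parent_count -= 1
--         if parent_count == 0:
--             parent_count, node_count = node_count, 0
--             height += 1
--         last_node = e
--         node_count += 1
--     return height
-- ===== SOURCE B (Python) =====
-- def solve(n, a):
--     if n == 1:
--         return 0
--     # split a[1:] into maximal non-descending runs; each run is one parent's children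
--     runs = []
--     cur = 1
--     prev = a[1]
--     for e in a[2:]:
--         if e < prev:
--             runs.append(cur)
--             cur = 1
--         else:
--             cur += 1
--         prev = e
--     runs.append(cur)
--     # BFS levels over the run list
--     height = 0
--     parents = 1
--     while runs:
--         height += 1
--         children = sum(runs[:parents])
--         runs = runs[parents:]
--         parents = children
--     return height
-- ===== Notes on version B (the rewrite author's own statement) =====
-- stated objective: alternative
-- what changed: B first splits a[1:] into maximal non-descending run lengths (one run = one parent's children) and then runs a separate BFS-level loop over the run list, instead of A's single pass juggling parent_count/node_count counters; the proof shows this two-phase decomposition returns A's exact height. Pre_ excludes only inputs where A raises IndexError (n != 1 with len(a) < 2).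
import Mathlib
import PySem

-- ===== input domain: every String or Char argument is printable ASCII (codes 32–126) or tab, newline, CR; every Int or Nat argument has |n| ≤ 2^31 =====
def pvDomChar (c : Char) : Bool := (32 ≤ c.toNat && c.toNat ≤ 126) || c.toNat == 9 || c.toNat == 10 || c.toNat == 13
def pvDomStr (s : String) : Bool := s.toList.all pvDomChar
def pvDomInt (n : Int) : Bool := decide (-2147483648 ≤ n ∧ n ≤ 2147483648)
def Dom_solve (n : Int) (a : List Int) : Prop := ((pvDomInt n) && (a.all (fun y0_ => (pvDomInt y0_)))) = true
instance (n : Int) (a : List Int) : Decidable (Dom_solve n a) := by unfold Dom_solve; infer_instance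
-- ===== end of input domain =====

-- B replaces A's one-pass counter juggling by a two-phase decomposition (run lengths of a[1:], then a
-- BFS-level loop over the runs); same cost, proved to return the same height ("alternative").

-- ===== PORT A =====
-- one loop iteration of A: state = (height, parent_count, node_count, last_node)
def aStep (st : Int × Int × Int × Int) (e : Int) : Int × Int × Int × Int :=
  let pc1 := if e < st.2.2.2 then st.2.1 - 1 else st.2.1
  let s2 := if pc1 = 0 then (st.2.2.1, (0 : Int), st.1 + 1) else (pc1, st.2.2.1, st.1)
  (s2.2.2, s2.1, s2.2.1 + 1, e)

def solve (n : Int) (a : List Int) : Int :=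
  if n = 1 then 0
  else
    match PySem.List.pyGet? a 1 with
    | none => 0  -- a[1] raises IndexError in Python; excluded by Pre_solve
    | some a1 => ((PySem.List.slice a (some 2) none).foldl aStep (1, 1, 1, a1)).1

-- ===== PORT B =====
-- run-building loop of Source B: state = (runs, cur, prev)
def bRunStep (st : List Int × Int × Int) (e : Int) : List Int × Int × Int :=
  if e < st.2.2 then (st.1 ++ [st.2.1], 1, e) else (st.1, st.2.1 + 1, e)

-- Source B's `while runs:` level loop; fuel = runs.length only makes the loop total (each Python
-- iteration removes at least one run, so the fuel is never the reason the loop stops inside Pre_).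
def levelsF : Nat → List Int → Int → Int
  | 0, _, _ => 0
  | f + 1, runs, parents =>
      if runs = [] then 0
      else 1 + levelsF f (runs.drop parents.toNat) ((runs.take parents.toNat).sum)

def solve_alt (n : Int) (a : List Int) : Int :=
  if n = 1 then 0
  else
    match PySem.List.pyGet? a 1 with
    | none => 0  -- a[1] raises IndexError in Python; excluded by Pre_solve
    | some a1 =>
      let st := (PySem.List.slice a (some 2) none).foldl bRunStep ([], 1, a1)
      let runs := st.1 ++ [st.2.1]
      levelsF runs.length runs 1

-- ===== PRECONDITION & SPEC =====
-- Pre_ excludes exactly the inputs where A raises IndexError at a[1] (n ≠ 1 and len(a) < 2).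
def Pre_solve (n : Int) (a : List Int) : Prop := n = 1 ∨ 2 ≤ a.length
instance (n : Int) (a : List Int) : Decidable (Pre_solve n a) := by unfold Pre_solve; infer_instance

def pvWitness_solve : Int × List Int := (3, [1, 2, 2])

def Spec_solve (n : Int) (a : List Int) (out : Int) : Prop := out = solve_alt n a
instance (n : Int) (a : List Int) (out : Int) : Decidable (Spec_solve n a out) := by unfold Spec_solve; infer_instance

-- ===== CLAIM (what is proved, stated in full; the proofs are below) =====
def Claim_equal_solve : Prop := ∀ (n : Int) (a : List Int), Dom_solve n a → Pre_solve n a → Spec_solve n a (solve n a)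

-- ===== LEMMAS AND PROOFS =====

-- the list of maximal non-descending run lengths of (current-run-so-far cur, previous element prev, rest t)
def runsOf (prev cur : Int) : List Int → List Int
  | [] => [cur]
  | e :: t => if e < prev then cur :: runsOf e 1 t else runsOf e (cur + 1) t

theorem runsOf_ne_nil (prev cur : Int) (t : List Int) : runsOf prev cur t ≠ [] := by
  induction t generalizing prev cur with
  | nil => simp [runsOf]
  | cons e t ih => simp only [runsOf]; split <;> simp [ih]

theorem levelsF_nil (f : Nat) (p : Int) : levelsF f [] p = 0 := by
  cases f <;> simp [levelsF]

-- B's run-building fold computes runsOf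
theorem bfold_runs (t : List Int) (acc : List Int) (cur prev : Int) :
    (t.foldl bRunStep (acc, cur, prev)).1 ++ [(t.foldl bRunStep (acc, cur, prev)).2.1]
      = acc ++ runsOf prev cur t := by
  induction t generalizing acc cur prev with
  | nil => simp [runsOf]
  | cons e t ih =>
    simp only [List.foldl_cons, bRunStep, runsOf]
    split
    · rw [ih]; simp
    · rw [ih]

-- the central invariant: A's fold from a mid-level state equals the level count of the remaining runs
theorem main_inv (t : List Int) (f : Nat) (h p c cur prev : Int)
    (hp : 1 ≤ p) (hcur : 1 ≤ cur) (hc : cur ≤ c)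
    (hf : ((runsOf prev cur t).drop p.toNat).length ≤ f) :
    (t.foldl aStep (h, p, c, prev)).1
      = h + levelsF f ((runsOf prev cur t).drop p.toNat)
              ((c - cur) + ((runsOf prev cur t).take p.toNat).sum) := by
  induction t generalizing f h p c cur prev with
  | nil =>
    obtain ⟨k, hk⟩ : ∃ k, p.toNat = k + 1 := ⟨p.toNat - 1, by omega⟩
    simp [runsOf, hk, levelsF_nil]
  | cons e t ih =>
    simp only [List.foldl_cons]
    by_cases he : e < prev
    · have hrw : runsOf prev cur (e :: t) = cur :: runsOf e 1 t := by simp [runsOf, he]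
      rw [hrw] at hf ⊢
      obtain ⟨x, xs, hxs⟩ : ∃ x xs, runsOf e 1 t = x :: xs := by
        cases hRl : runsOf e 1 t with
        | nil => exact absurd hRl (runsOf_ne_nil e 1 t)
        | cons x xs => exact ⟨x, xs, rfl⟩
      by_cases hp1 : p = 1
      · -- level boundary: parent_count hits 0, height increments, a fresh level starts
        have hstep : aStep (h, p, c, prev) e = (h + 1, c, 1, e) := by
          simp [aStep, he, hp1]
        rw [hstep]
        rw [hp1] at hf ⊢
        have hd : List.drop (1 : Int).toNat (cur :: runsOf e 1 t) = runsOf e 1 t := rfl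
        have htk : List.take (1 : Int).toNat (cur :: runsOf e 1 t) = [cur] := rfl
        rw [hd] at hf
        rw [hd, htk]
        simp only [List.sum_cons, List.sum_nil]
        have hlen : 1 ≤ (runsOf e 1 t).length := by rw [hxs]; simp
        obtain ⟨f', rfl⟩ : ∃ f', f = f' + 1 := ⟨f - 1, by omega⟩
        have harg : c - cur + (cur + 0) = c := by ring
        rw [harg]
        have hunf : levelsF (f' + 1) (runsOf e 1 t) c
            = 1 + levelsF f' ((runsOf e 1 t).drop c.toNat) (((runsOf e 1 t).take c.toNat).sum) := by
          rw [hxs]; simp [levelsF]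
        rw [hunf]
        have hih := ih (f := f') (h := h + 1) (p := c) (c := 1) (cur := 1) (prev := e)
          (by omega) (by omega) (by omega)
          (by
            have hc1 : 1 ≤ c.toNat := by omega
            simp only [List.length_drop]
            omega)
        rw [hih]
        have e1 : (1 : Int) - 1 + ((runsOf e 1 t).take c.toNat).sum
            = ((runsOf e 1 t).take c.toNat).sum := by ring
        rw [e1]
        ring
      · -- run boundary within a level: parent_count decrements
        have hp2 : 2 ≤ p := by omega
        have hstep : aStep (h, p, c, prev) e = (h, p - 1, c + 1, e) := by
          simp only [aStep]
          have h1 : p - 1 ≠ 0 := by omega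
          simp [he, h1]
        rw [hstep]
        obtain ⟨k, hk⟩ : ∃ k, p.toNat = k + 1 := ⟨p.toNat - 1, by omega⟩
        have hk' : (p - 1).toNat = k := by omega
        rw [hk] at hf ⊢
        simp only [List.drop_succ_cons, List.take_succ_cons, List.sum_cons] at hf ⊢
        have hih := ih (f := f) (h := h) (p := p - 1) (c := c + 1) (cur := 1) (prev := e)
          (by omega) (by omega) (by omega) (by rw [hk']; exact hf)
        rw [hk'] at hih
        rw [hih]
        have e1 : c + 1 - 1 + ((runsOf e 1 t).take k).sum
            = c - cur + (cur + ((runsOf e 1 t).take k).sum) := by ring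
        rw [e1]
    · -- same run continues: node_count and the current run length both grow
      have hstep : aStep (h, p, c, prev) e = (h, p, c + 1, e) := by
        simp only [aStep]
        have h1 : p ≠ 0 := by omega
        simp [he, h1]
      rw [hstep]
      have hrw : runsOf prev cur (e :: t) = runsOf e (cur + 1) t := by simp [runsOf, he]
      rw [hrw] at hf ⊢
      have hih := ih (f := f) (h := h) (p := p) (c := c + 1) (cur := cur + 1) (prev := e)
        (by omega) (by omega) (by omega) hf
      rw [hih]
      have e1 : c + 1 - (cur + 1) = c - cur := by ring
      rw [e1]

-- the two ports agree once n ≠ 1 and a[1] exists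
theorem agree (n : Int) (a : List Int) : solve n a = solve_alt n a := by
  unfold solve solve_alt
  by_cases hn : n = 1
  · simp [hn]
  · simp only [hn, if_false]
    cases hg : PySem.List.pyGet? a 1 with
    | none => rfl
    | some a1 =>
      simp only []
      set t := PySem.List.slice a (some 2) none with ht
      have hruns := bfold_runs t [] 1 a1
      simp only [List.nil_append] at hruns
      set st := t.foldl bRunStep ([], 1, a1) with hst
      set R := runsOf a1 1 t with hRdef
      rw [hruns]
      have hR := runsOf_ne_nil a1 1 t
      rw [← hRdef] at hR
      obtain ⟨L, hL⟩ : ∃ L, R.length = L + 1 := by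
        cases hRl : R with
        | nil => exact absurd hRl hR
        | cons x xs => exact ⟨xs.length, by simp⟩
      have hunf : levelsF R.length R 1
          = 1 + levelsF L (R.drop (1 : Int).toNat) ((R.take (1 : Int).toNat).sum) := by
        rw [hL]
        cases hRl : R with
        | nil => exact absurd hRl hR
        | cons x xs => simp [levelsF]
      rw [hunf]
      have hmain := main_inv t L 1 1 1 1 a1 (by omega) (by omega) (by omega)
        (by
          rw [← hRdef]
          simp only [Int.toNat_one, List.length_drop]
          omega)
      rw [← hRdef] at hmain
      rw [hmain]
      have : (1 : Int) - 1 + (R.take (1 : Int).toNat).sum = (R.take (1 : Int).toNat).sum := by ring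
      rw [this]

-- ===== VERDICT (by name: the statement is the Claim_ definition above) =====
theorem solve_spec : Claim_equal_solve := by
  intro n a _ _
  unfold Spec_solve
  exact agree n a
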